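-- pv_equiv track=rewrite | github.com/infomuscle/Algorithms_BOJ | kakao4-test.py | solution
-- ===== SOURCE A (Python) =====
-- def idxAdder(idx, foods):
--     if idx+1 == foods:
--         result = 0
--     else:
--         result = idx+1
--     return result
--
-- def solution(food_times, k):
--     timer, idx = 0,0
--     foods = len(food_times)
--
--     while True:
--         if food_times[idx] != 0:
--             food_times[idx] -= 1
--             timer += 1
--             idx = idxAdder(idx, foods)
--             if timer == k:
--                 while True:
--                     if food_times[idx] != 0:
--                         answer = idx + 1
--                         break
--                     else:
--                         idx = idxAdder(idx, foods)
--                 break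
--             elif timer > k:
--                 answer = -1
--                 break
--         else:
--             idx = idxAdder(idx, foods)
--
--
--     return answer
-- ===== SOURCE B (Python) =====
-- def solution(food_times, k):
--     # B: batched round-level arithmetic instead of unit-by-unit rotating simulation.
--     if k < 1:
--         return -1
--     f = list(food_times)
--     while True:
--         nz = [i for i, x in enumerate(f) if x != 0]
--         c = len(nz)
--         if k < c:
--             return nz[k] + 1
--         pos = [x for x in f if x > 0]
--         q = k // c
--         if pos:
--             mp = min(pos)
--             if mp < q:
--                 q = mp
--         k -= q * c
--         f = [0 if x == 0 else x - q for x in f]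
-- ===== Notes on version B (the rewrite author's own statement) =====
-- stated objective: alternative
-- what changed: Replaces the unit-by-unit rotating-pointer simulation (one tick per time unit, with an inner scan loop for the answer) by batched round arithmetic: each iteration jumps min(k // c, smallest positive time) whole rounds at once and finally indexes the survivor list directly, so the loop body runs at most once per distinct positive value (intended as faster; a timing run measured 1.57x at the largest size but inconsistently, so no speed is claimed).
import Mathlib
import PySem

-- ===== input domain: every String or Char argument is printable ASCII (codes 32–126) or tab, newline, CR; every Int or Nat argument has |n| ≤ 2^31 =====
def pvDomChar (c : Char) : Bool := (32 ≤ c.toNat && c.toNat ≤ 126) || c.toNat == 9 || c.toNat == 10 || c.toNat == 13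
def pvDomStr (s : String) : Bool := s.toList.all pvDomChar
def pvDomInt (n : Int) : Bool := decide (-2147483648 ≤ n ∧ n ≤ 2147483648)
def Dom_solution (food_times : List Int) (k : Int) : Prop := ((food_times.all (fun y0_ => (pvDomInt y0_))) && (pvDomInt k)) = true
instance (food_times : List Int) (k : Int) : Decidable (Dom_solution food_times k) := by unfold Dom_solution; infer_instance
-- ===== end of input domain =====

-- B replaces A's unit-by-unit rotating-pointer simulation by batched round arithmetic
-- (jump min(k // c, smallest positive time) whole rounds per iteration).
-- Python A mutates food_times in place (decrements entries); the equivalence proved here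
-- is about the RETURN value only (B does not mutate its argument).

-- ===== PORT A =====
def idxAdder (idx : Int) (foods : Int) : Int :=
  if idx + 1 = foods then 0 else idx + 1

-- inner `while True` of A: scan forward (cyclically) for the next nonzero food; fuel only
-- makes the Python loop total (Python loops forever when no food is nonzero).
def innerScan (fuel : Nat) (f : List Int) (idx : Int) : Option Int :=
  match fuel with
  | 0 => none
  | fuel + 1 =>
    match PySem.List.pyGet? f idx with
    | none => none
    | some v => if v ≠ 0 then some (idx + 1) else innerScan fuel f (idxAdder idx (f.length : Int))

-- outer `while True` of A; `none` = IndexError (empty list) or fuel exhausted (Python diverges)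
def loopA (fuel : Nat) (f : List Int) (idx : Int) (timer : Int) (k : Int) : Option Int :=
  match fuel with
  | 0 => none
  | fuel + 1 =>
    match PySem.List.pyGet? f idx with
    | none => none
    | some v =>
      if v ≠ 0 then
        let f' := f.set idx.toNat (v - 1)
        let timer' := timer + 1
        let idx' := idxAdder idx (f.length : Int)
        if timer' = k then innerScan (f.length + 1) f' idx'
        else if timer' > k then some (-1)
        else loopA fuel f' idx' timer' k
      else loopA fuel f (idxAdder idx (f.length : Int)) timer k

def solution (food_times : List Int) (k : Int) : Int :=
  (loopA ((k.toNat + 1) * (food_times.length + 1) + 1) food_times 0 0 k).getD 0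

-- ===== PORT B =====
-- body of Source B's `while True`; fuel only makes the loop total (under Pre_ it returns long
-- before the fuel runs out); the `c = 0` guard is exactly where Python raises ZeroDivisionError
def loopB (fuel : Nat) (f : List Int) (k : Int) : Option Int :=
  match fuel with
  | 0 => none
  | fuel + 1 =>
    let nz : List Int := ((PySem.List.enumerate f).filter (fun p => p.2 != 0)).map (fun p => p.1)
    let c : Int := (nz.length : Int)
    if k < c then (PySem.List.pyGet? nz k).map (· + 1)
    else
      let pos := f.filter (fun x => decide (0 < x))
      if c = 0 then none
      else
        let q0 := PySem.Int.floordiv k c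
        let q := match PySem.List.min? pos id with
          | some mp => if mp < q0 then mp else q0
          | none => q0
        loopB fuel (f.map (fun x => if x = 0 then 0 else x - q)) (k - q * c)

def solution_alt (food_times : List Int) (k : Int) : Int :=
  if k < 1 then -1 else (loopB (food_times.length + 2) food_times k).getD 0

-- ===== PRECONDITION & SPEC =====
-- total units Python A can still serve from the nonnegative entries
def posSum (f : List Int) : Int := (f.map (fun x => max x 0)).sum

-- Pre_ = exactly the inputs where Python A terminates normally: it raises IndexError on [],
-- and loops forever when k ≤ 0 with every food zero, or when k ≥ 1 and (no negative entry and
-- k ≥ sum of the positive entries) — then fewer than k+1 units exist to serve.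
def Pre_solution (food_times : List Int) (k : Int) : Prop :=
  food_times ≠ [] ∧
    ((k < 1 ∧ ∃ x ∈ food_times, x ≠ 0) ∨
     (1 ≤ k ∧ ((∃ x ∈ food_times, x < 0) ∨ k < posSum food_times)))
instance (food_times : List Int) (k : Int) : Decidable (Pre_solution food_times k) := by
  unfold Pre_solution; infer_instance

def pvWitness_solution : List Int × Int := ([3, 2], 3)

def Spec_solution (food_times : List Int) (k : Int) (out : Int) : Prop := out = solution_alt food_times k
instance (food_times : List Int) (k : Int) (out : Int) : Decidable (Spec_solution food_times k out) := by
  unfold Spec_solution; infer_instance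

-- ===== CLAIM (what is proved, stated in full; the proofs are below) =====
def Claim_equal_solution : Prop := ∀ (food_times : List Int) (k : Int), Dom_solution food_times k → Pre_solution food_times k → Spec_solution food_times k (solution food_times k)

-- ===== LEMMAS AND PROOFS =====

-- ---- spec-side machinery: rounds ----
def dec1 (x : Int) : Int := if x = 0 then 0 else x - 1
def decs (f : List Int) : List Int := f.map dec1

-- indices ≥ idx (this round's remaining turns) holding a nonzero food
def nzFrom (f : List Int) (idx : Nat) : List Nat :=
  (List.range' idx (f.length - idx)).filter (fun i => f.getD i 0 != 0)

-- index of the m-th unit (0-based) eaten in round-robin order from a fresh round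
def roundSolve (f : List Int) (m : Nat) : Option Int :=
  if h : m < (nzFrom f 0).length then some (((nzFrom f 0).get ⟨m, h⟩ : Nat) : Int)
  else if hc : (nzFrom f 0).length = 0 then none
  else roundSolve (decs f) (m - (nzFrom f 0).length)
termination_by m
decreasing_by omega

-- same, starting mid-round with the pointer at idx
def specFrom (f : List Int) (idx : Nat) (m : Nat) : Option Int :=
  let t := nzFrom f idx
  if h : m < t.length then some ((t.get ⟨m, h⟩ : Nat) : Int)
  else roundSolve (f.take idx ++ decs (f.drop idx)) (m - t.length)

-- cyclic distance from idx to the next nonzero food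
def cycd (f : List Int) (idx : Nat) : Nat :=
  (List.range f.length).findIdx (fun j => f.getD ((idx + j) % f.length) 0 != 0)

def nidx (n idx : Nat) : Nat := if idx + 1 = n then 0 else idx + 1

-- at least m+1 more units will ever be served
def enough (f : List Int) (m : Nat) : Prop := (∃ x ∈ f, x < 0) ∨ (m : Int) < posSum f

-- ---- basic lemmas ----
lemma nidx_lt {n idx : Nat} (h : idx < n) : nidx n idx < n := by
  unfold nidx; split <;> omega

lemma idxAdder_cast {n idx : Nat} (h : idx < n) :
    idxAdder (idx : Int) (n : Int) = ((nidx n idx : Nat) : Int) := by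
  unfold idxAdder nidx
  split <;> split <;> simp_all <;> omega

lemma getD_lt {f : List Int} {i : Nat} (h : i < f.length) : f.getD i 0 = f[i] := by
  simp [List.getD_eq_getElem?_getD, List.getElem?_eq_getElem h]

lemma nzFrom_cons {f : List Int} {idx : Nat} (h : idx < f.length) :
    nzFrom f idx = (if f.getD idx 0 ≠ 0 then [idx] else []) ++ nzFrom f (idx + 1) := by
  unfold nzFrom
  rw [show f.length - idx = (f.length - (idx + 1)) + 1 by omega, List.range'_succ,
    List.filter_cons]
  by_cases h0 : f.getD idx 0 = 0 <;>
    simp only [List.getD_eq_getElem?_getD] at h0 <;> simp [h0]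

lemma nzFrom_length_zero (f : List Int) : nzFrom f f.length = [] := by
  unfold nzFrom
  simp

lemma mem_nzFrom {f : List Int} {idx i : Nat} :
    i ∈ nzFrom f idx ↔ idx ≤ i ∧ i < f.length ∧ f.getD i 0 ≠ 0 := by
  unfold nzFrom
  simp [List.mem_filter, List.mem_range'_1]
  omega

lemma exists_nz_of_enough {f : List Int} {m : Nat} (h : enough f m) :
    ∃ i, i < f.length ∧ f.getD i 0 ≠ 0 := by
  by_contra hc
  push Not at hc
  have hall : ∀ x ∈ f, x = 0 := by
    intro x hx
    obtain ⟨i, hi, rfl⟩ := List.mem_iff_getElem.mp hx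
    have := hc i hi
    rwa [getD_lt hi] at this
  rcases h with ⟨x, hx, hneg⟩ | hpos
  · have := hall x hx; omega
  · have hz : posSum f = 0 := by
      unfold posSum
      apply List.sum_eq_zero
      intro y hy
      obtain ⟨x, hx, rfl⟩ := List.mem_map.mp hy
      simp [hall x hx]
    rw [hz] at hpos
    omega

lemma nzFrom_ne_nil {f : List Int} (h : ∃ i, i < f.length ∧ f.getD i 0 ≠ 0) :
    nzFrom f 0 ≠ [] := by
  obtain ⟨i, hi, hnz⟩ := h
  exact List.ne_nil_of_mem (mem_nzFrom.mpr ⟨Nat.zero_le _, hi, hnz⟩)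

lemma all_zero_of_nzFrom_nil {f : List Int} (h : nzFrom f 0 = []) : ∀ x ∈ f, x = 0 := by
  intro x hx
  by_contra hnz
  obtain ⟨i, hi, hgi⟩ := List.mem_iff_getElem.mp hx
  have : i ∈ nzFrom f 0 := mem_nzFrom.mpr ⟨Nat.zero_le _, hi, by rw [getD_lt hi, hgi]; exact hnz⟩
  simp [h] at this

lemma decs_all_zero {f : List Int} (h : nzFrom f 0 = []) : decs f = f := by
  have hx : ∀ x ∈ f, dec1 x = x := by
    intro x hx
    simp [dec1, all_zero_of_nzFrom_nil h x hx]
  unfold decs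
  rw [List.map_congr_left hx, List.map_id']

-- ---- specFrom step lemmas ----
lemma specFrom_zero (f : List Int) (m : Nat) : specFrom f 0 m = roundSolve f m := by
  unfold specFrom
  by_cases h : m < (nzFrom f 0).length
  · rw [dif_pos h]
    conv_rhs => rw [roundSolve]
    rw [dif_pos h]
  · rw [dif_neg h]
    by_cases hc : (nzFrom f 0).length = 0
    · rw [List.length_eq_zero_iff] at hc
      simp [decs_all_zero hc, hc]
    · conv_rhs => rw [roundSolve]
      rw [dif_neg h, dif_neg hc]
      simp

lemma specFrom_length (f : List Int) (m : Nat) : specFrom f f.length m = roundSolve f m := by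
  unfold specFrom
  rw [nzFrom_length_zero]
  simp [decs]

lemma nzFrom_set_succ {f : List Int} {idx : Nat} (w : Int) :
    nzFrom (f.set idx w) (idx + 1) = nzFrom f (idx + 1) := by
  unfold nzFrom
  rw [List.length_set]
  apply List.filter_congr
  intro i hi
  rw [List.mem_range'_1] at hi
  simp [List.getD_eq_getElem?_getD, List.getElem?_set_ne (show idx ≠ i by omega)]

lemma specFrom_skip_succ {f : List Int} {idx : Nat} {m : Nat} (h : idx < f.length)
    (h0 : f.getD idx 0 = 0) : specFrom f idx m = specFrom f (idx + 1) m := by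
  have hsplit : f.take idx ++ decs (f.drop idx) = f.take (idx + 1) ++ decs (f.drop (idx + 1)) := by
    rw [List.drop_eq_getElem_cons h, List.take_add_one, List.getElem?_eq_getElem h]
    unfold decs
    rw [List.map_cons]
    have h0' : f[idx] = 0 := by rw [getD_lt h] at h0; exact h0
    rw [h0']
    simp [dec1]
  unfold specFrom
  rw [nzFrom_cons h, if_neg (not_not_intro h0), List.nil_append, hsplit]

lemma specFrom_skip {f : List Int} {idx : Nat} {m : Nat} (h : idx < f.length)
    (h0 : f.getD idx 0 = 0) : specFrom f idx m = specFrom f (nidx f.length idx) m := by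
  rw [specFrom_skip_succ h h0]
  unfold nidx
  by_cases hw : idx + 1 = f.length
  · rw [if_pos hw, hw, specFrom_length, specFrom_zero]
  · rw [if_neg hw]

lemma specFrom_eat_succ {f : List Int} {idx : Nat} {m : Nat} (h : idx < f.length)
    (h0 : f.getD idx 0 ≠ 0) :
    specFrom f idx (m + 1) = specFrom (f.set idx (f.getD idx 0 - 1)) (idx + 1) m := by
  set g := f.set idx (f.getD idx 0 - 1) with hg
  have hglen : g.length = f.length := by rw [hg, List.length_set]
  have hsplit : f.take idx ++ decs (f.drop idx) = g.take (idx + 1) ++ decs (g.drop (idx + 1)) := by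
    have hdrop : g.drop (idx + 1) = f.drop (idx + 1) := by
      rw [hg, List.drop_set, if_pos (by omega)]
    have htake : g.take (idx + 1) = f.take idx ++ [f.getD idx 0 - 1] := by
      rw [hg, List.take_set, List.take_add_one, List.getElem?_eq_getElem h,
        List.set_append, if_neg (by simp [List.length_take])]
      simp [List.length_take, Nat.min_eq_left (Nat.le_of_lt h)]
    rw [hdrop, htake, List.drop_eq_getElem_cons h]
    unfold decs
    rw [List.map_cons]
    have : dec1 f[idx] = f.getD idx 0 - 1 := by
      rw [getD_lt h] at h0 ⊢
      simp [dec1, h0]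
    rw [this, List.append_assoc]
    rfl
  unfold specFrom
  rw [nzFrom_cons h, if_pos h0, hg, nzFrom_set_succ, ← hg]
  simp only [List.singleton_append, List.length_cons]
  by_cases hm : m < (nzFrom f (idx + 1)).length
  · rw [dif_pos (by omega), dif_pos hm]
    simp
  · rw [dif_neg (by omega), dif_neg hm, hsplit]
    congr 1
    omega

lemma specFrom_eat {f : List Int} {idx : Nat} {m : Nat} (h : idx < f.length)
    (h0 : f.getD idx 0 ≠ 0) :
    specFrom f idx (m + 1) = specFrom (f.set idx (f.getD idx 0 - 1)) (nidx f.length idx) m := by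
  rw [specFrom_eat_succ h h0]
  unfold nidx
  by_cases hw : idx + 1 = f.length
  · rw [if_pos hw, hw, show f.length = (f.set idx (f.getD idx 0 - 1)).length by rw [List.length_set],
      specFrom_length, specFrom_zero]
  · rw [if_neg hw]

-- ---- cycd lemmas ----
lemma cycd_hit_shift {f : List Int} {idx : Nat} (h : idx < f.length)
    (hhit : ∃ i, i < f.length ∧ f.getD i 0 ≠ 0) (h0 : f.getD idx 0 = 0) :
    ∃ j, 1 ≤ j ∧ j < f.length ∧ f.getD ((idx + j) % f.length) 0 ≠ 0 := by
  obtain ⟨i, hi, hnz⟩ := hhit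
  rcases Nat.lt_trichotomy i idx with hlt | rfl | hgt
  · refine ⟨i + f.length - idx, by omega, by omega, ?_⟩
    have hm : (idx + (i + f.length - idx)) % f.length = i := by
      rw [show idx + (i + f.length - idx) = f.length + i by omega, Nat.add_mod_left,
        Nat.mod_eq_of_lt hi]
    rwa [hm]
  · exact absurd h0 hnz
  · refine ⟨i - idx, by omega, by omega, ?_⟩
    have hm : (idx + (i - idx)) % f.length = i := by
      rw [show idx + (i - idx) = i by omega, Nat.mod_eq_of_lt hi]
    rwa [hm]

lemma cycd_lt {f : List Int} {idx : Nat} (h : idx < f.length)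
    (hhit : ∃ i, i < f.length ∧ f.getD i 0 ≠ 0) : cycd f idx < f.length := by
  unfold cycd
  have hex : ∃ x ∈ List.range f.length, (f.getD ((idx + x) % f.length) 0 != 0) = true := by
    by_cases h0 : f.getD idx 0 = 0
    · obtain ⟨j, hj1, hjn, hjp⟩ := cycd_hit_shift h hhit h0
      refine ⟨j, List.mem_range.mpr hjn, ?_⟩
      rw [List.getD_eq_getElem?_getD] at hjp
      simp [hjp]
    · refine ⟨0, List.mem_range.mpr (by omega), ?_⟩
      rw [Nat.add_zero, Nat.mod_eq_of_lt h]
      rw [List.getD_eq_getElem?_getD] at h0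
      simp [h0]
  simpa using List.findIdx_lt_length.mpr hex

lemma cycd_skip {f : List Int} {idx : Nat} (h : idx < f.length)
    (hhit : ∃ i, i < f.length ∧ f.getD i 0 ≠ 0) (h0 : f.getD idx 0 = 0) :
    cycd f idx = cycd f (nidx f.length idx) + 1 := by
  obtain ⟨n, hn⟩ : ∃ n, f.length = n + 1 := ⟨f.length - 1, by omega⟩
  have hps : (fun j => f.getD ((nidx f.length idx + j) % f.length) 0 != 0)
      = (fun j => f.getD ((idx + j) % f.length) 0 != 0) ∘ Nat.succ := by
    funext j
    simp only [Function.comp_apply]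
    congr 2
    have hmod : nidx f.length idx = (idx + 1) % f.length := by
      unfold nidx
      split
      · rename_i hw
        rw [hw, Nat.mod_self]
      · rw [Nat.mod_eq_of_lt (by omega)]
    rw [hmod, Nat.mod_add_mod, show idx + 1 + j = idx + Nat.succ j by omega]
  obtain ⟨j, hj1, hjn, hjp⟩ := cycd_hit_shift h hhit h0
  have hlt : (List.range n).findIdx
      ((fun j => f.getD ((idx + j) % f.length) 0 != 0) ∘ Nat.succ) < n := by
    have hex : ∃ x ∈ List.range n,
        ((fun j => f.getD ((idx + j) % f.length) 0 != 0) ∘ Nat.succ) x = true := by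
      refine ⟨j - 1, List.mem_range.mpr (by omega), ?_⟩
      simp only [Function.comp_apply]
      rw [show Nat.succ (j - 1) = j by omega]
      rw [List.getD_eq_getElem?_getD] at hjp
      simp [hjp]
    simpa using List.findIdx_lt_length.mpr hex
  unfold cycd
  rw [hps]
  conv_lhs => rw [show List.range f.length = 0 :: List.map Nat.succ (List.range n) from by
    rw [hn, List.range_succ_eq_map]]
  simp only [List.findIdx_cons]
  rw [show (idx + 0) % f.length = idx from by rw [Nat.add_zero, Nat.mod_eq_of_lt h], h0]
  simp only [bne_self_eq_false, cond_false, List.findIdx_map]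
  conv_rhs => rw [show List.range f.length = List.range n ++ [n] from by rw [hn, List.range_succ]]
  rw [List.findIdx_append, if_pos (by simpa using hlt)]

-- ---- enough lemmas ----
lemma posSum_append (l1 l2 : List Int) : posSum (l1 ++ l2) = posSum l1 + posSum l2 := by
  unfold posSum
  rw [List.map_append, List.sum_append]

lemma posSum_set {f : List Int} {idx : Nat} (h : idx < f.length) (v : Int) :
    posSum (f.set idx v) = posSum f - max (f.getD idx 0) 0 + max v 0 := by
  have hsum : posSum f = posSum (f.take idx) + max f[idx] 0 + posSum (f.drop (idx + 1)) := by
    conv_lhs => rw [show f = f.take idx ++ f[idx] :: f.drop (idx + 1) from by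
      rw [← List.drop_eq_getElem_cons h, List.take_append_drop]]
    rw [posSum_append]
    unfold posSum
    rw [List.map_cons, List.sum_cons]
    ring
  rw [List.set_eq_take_cons_drop v h, posSum_append, hsum, getD_lt h]
  unfold posSum
  rw [List.map_cons, List.sum_cons]
  ring

lemma enough_eat {f : List Int} {idx : Nat} {m : Nat} (h : idx < f.length)
    (h0 : f.getD idx 0 ≠ 0) (he : enough f (m + 1)) :
    enough (f.set idx (f.getD idx 0 - 1)) m := by
  rcases he with ⟨x, hx, hneg⟩ | hpos
  · left
    obtain ⟨j, hj, hfj⟩ := List.mem_iff_getElem.mp hx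
    by_cases hji : j = idx
    · refine ⟨f.getD idx 0 - 1, ?_, by subst hji; rw [getD_lt h, hfj]; omega⟩
      exact List.mem_iff_getElem.mpr ⟨idx, by rw [List.length_set]; exact h, by
        rw [List.getElem_set_self]⟩
    · refine ⟨x, ?_, hneg⟩
      exact List.mem_iff_getElem.mpr ⟨j, by rw [List.length_set]; exact hj, by
        rw [List.getElem_set_ne (fun hh => hji hh.symm)]
        exact hfj⟩
  · right
    rw [posSum_set h]
    have h1 : max (f.getD idx 0 - 1) 0 ≥ max (f.getD idx 0) 0 - 1 := by omega
    push_cast at hpos ⊢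
    omega

-- ---- A-side: the scan and the main loop ----
lemma innerScan_eq (d : Nat) : ∀ (f : List Int) (idx : Nat) (fuel : Nat),
    idx < f.length → (∃ i, i < f.length ∧ f.getD i 0 ≠ 0) → cycd f idx = d → d + 1 ≤ fuel →
    innerScan fuel f (idx : Int) = (specFrom f idx 0).map (· + 1) := by
  induction d using Nat.strongRecOn with
  | ind d ih =>
    intro f idx fuel h hhit hcd hfuel
    obtain ⟨fuel, rfl⟩ : ∃ fl, fuel = fl + 1 := ⟨fuel - 1, by omega⟩
    simp only [innerScan, PySem.List.pyGet?_natCast, List.getElem?_eq_getElem h]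
    by_cases h0 : f.getD idx 0 = 0
    · rw [if_neg (by rw [getD_lt h] at h0; simp [h0])]
      rw [idxAdder_cast h]
      have hskip := cycd_skip h hhit h0
      rw [ih (cycd f (nidx f.length idx)) (by omega) f (nidx f.length idx) fuel
        (nidx_lt h) hhit rfl (by omega), ← specFrom_skip h h0]
    · rw [if_pos (by rw [getD_lt h] at h0; simp [h0])]
      unfold specFrom
      rw [nzFrom_cons h, if_pos h0]
      simp

lemma loopA_eq (fuel : Nat) : ∀ (f : List Int) (idx : Nat) (t k : Int) (m : Nat),
    idx < f.length → 1 ≤ m → t + (m : Int) = k → enough f m →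
    m * f.length + cycd f idx + 1 ≤ fuel →
    loopA fuel f (idx : Int) t k = (specFrom f idx m).map (· + 1) := by
  induction fuel with
  | zero => intro f idx t k m _ _ _ _ hfuel; omega
  | succ fuel ih =>
    intro f idx t k m h hm ht he hfuel
    have hhit := exists_nz_of_enough he
    simp only [loopA, PySem.List.pyGet?_natCast, List.getElem?_eq_getElem h]
    by_cases h0 : f.getD idx 0 = 0
    · -- skip a zero food
      rw [if_neg (by rw [getD_lt h] at h0; simp [h0])]
      rw [idxAdder_cast h]
      have hskip := cycd_skip h hhit h0
      rw [ih f (nidx f.length idx) t k m (nidx_lt h) hm ht he (by omega),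
        ← specFrom_skip h h0]
    · -- eat one unit
      rw [if_pos (by rw [getD_lt h] at h0; simp [h0])]
      simp only [Int.toNat_natCast]
      rw [idxAdder_cast h]
      have hv : f[idx] = f.getD idx 0 := (getD_lt h).symm
      set g := f.set idx (f.getD idx 0 - 1) with hg
      have hglen : g.length = f.length := List.length_set ..
      by_cases hm1 : m = 1
      · subst hm1
        rw [if_pos (by omega)]
        have he' : enough g 0 := enough_eat h h0 (by simpa using he)
        have hhit' : ∃ i, i < g.length ∧ g.getD i 0 ≠ 0 := exists_nz_of_enough he'
        have hd : cycd g (nidx f.length idx) < g.length :=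
          cycd_lt (by rw [hglen]; exact nidx_lt h) hhit'
        rw [hv, ← hg]
        rw [innerScan_eq (cycd g (nidx f.length idx)) g (nidx f.length idx) (f.length + 1)
          (by rw [hglen]; exact nidx_lt h) hhit' rfl (by omega)]
        rw [show specFrom f idx 1 = specFrom (f.set idx (f.getD idx 0 - 1)) (nidx f.length idx) 0
          from specFrom_eat h h0, hg]
      · -- m ≥ 2 : keep looping
        rw [if_neg (by intro hc; omega), if_neg (by omega)]
        have he' : enough g (m - 1) := by
          have := enough_eat h h0 (m := m - 1) (by rw [show m - 1 + 1 = m by omega]; exact he)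
          exact this
        have hhit' : ∃ i, i < g.length ∧ g.getD i 0 ≠ 0 := exists_nz_of_enough he'
        have hd : cycd g (nidx f.length idx) < g.length :=
          cycd_lt (by rw [hglen]; exact nidx_lt h) hhit'
        have hmul : (m - 1) * f.length + f.length = m * f.length := by
          obtain ⟨m', rfl⟩ : ∃ m', m = m' + 1 := ⟨m - 1, by omega⟩
          simp [Nat.add_mul]
        rw [hv, ← hg]
        rw [ih g (nidx f.length idx) (t + 1) k (m - 1) (by rw [hglen]; exact nidx_lt h)
          (by omega) (by push_cast; omega) he' (by rw [hglen] at hd; rw [hglen]; omega)]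
        rw [show m = (m - 1) + 1 by omega, specFrom_eat h h0,
          show (m - 1) + 1 - 1 = m - 1 by omega]

lemma loopA_neg (fuel : Nat) : ∀ (f : List Int) (idx : Nat) (k : Int),
    idx < f.length → k < 1 → (∃ i, i < f.length ∧ f.getD i 0 ≠ 0) →
    cycd f idx + 2 ≤ fuel →
    loopA fuel f (idx : Int) 0 k = some (-1) := by
  induction fuel with
  | zero => intro f idx k _ _ _ hfuel; omega
  | succ fuel ih =>
    intro f idx k h hk hhit hfuel
    simp only [loopA, PySem.List.pyGet?_natCast, List.getElem?_eq_getElem h]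
    by_cases h0 : f.getD idx 0 = 0
    · rw [if_neg (by rw [getD_lt h] at h0; simp [h0])]
      rw [idxAdder_cast h]
      have hskip := cycd_skip h hhit h0
      exact ih f (nidx f.length idx) k (nidx_lt h) hk hhit (by omega)
    · rw [if_pos (by rw [getD_lt h] at h0; simp [h0])]
      rw [if_neg (by omega), if_pos (by omega)]

-- ---- B-side: batching ----
lemma enum_nz_bridge : ∀ (f : List Int) (s : Nat),
    ((PySem.List.enumerate f (s : Int)).filter (fun p => p.2 != 0)).map (fun p => p.1)
      = ((List.range' s f.length).filter (fun i => f.getD (i - s) 0 != 0)).map (fun i => ((i : Nat) : Int)) := by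
  intro f
  induction f with
  | nil => intro s; simp [PySem.List.enumerate]
  | cons a f ihf =>
    intro s
    rw [show PySem.List.enumerate (a :: f) (s : Int)
        = ((s : Int), a) :: PySem.List.enumerate f ((s : Int) + 1) from rfl,
      show ((s : Int) + 1) = (((s + 1 : Nat) : Nat) : Int) from by push_cast; ring,
      show (a :: f).length = f.length + 1 from rfl, List.range'_succ]
    have htail : List.filter (fun i => (a :: f).getD (i - s) 0 != 0) (List.range' (s + 1) f.length)
        = List.filter (fun i => f.getD (i - (s + 1)) 0 != 0) (List.range' (s + 1) f.length) :=
      List.filter_congr (by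
        intro i hi
        rw [List.mem_range'_1] at hi
        rw [show i - s = (i - (s + 1)) + 1 by omega, List.getD_cons_succ])
    have hh : (a :: f).getD (s - s) 0 = a := by rw [Nat.sub_self, List.getD_cons_zero]
    simp only [List.filter_cons, hh, htail]
    have ih1 := ihf (s + 1)
    simp only [Nat.cast_add, Nat.cast_one] at ih1
    by_cases ha : a = 0
    · simp [ha, ih1]
    · simp [ha, ih1]

lemma nz_int_eq (f : List Int) :
    (((PySem.List.enumerate f).filter (fun p => p.2 != 0)).map (fun p => p.1))
      = (nzFrom f 0).map (fun i => ((i : Nat) : Int)) := by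
  rw [show (PySem.List.enumerate f) = (PySem.List.enumerate f ((0 : Nat) : Int)) from rfl,
    enum_nz_bridge f 0]
  unfold nzFrom
  simp

lemma nzFrom_map_eq {f : List Int} {g : Int → Int} (hg : ∀ x ∈ f, (g x = 0 ↔ x = 0)) :
    nzFrom (f.map g) 0 = nzFrom f 0 := by
  unfold nzFrom
  rw [List.length_map]
  apply List.filter_congr
  intro i hi
  rw [List.mem_range'_1] at hi
  have hlt : i < f.length := by omega
  rw [getD_lt (by simpa using hlt), getD_lt hlt, List.getElem_map]
  have hiff := hg f[i] (List.getElem_mem hlt)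
  by_cases hz : f[i] = 0
  · rw [hiff.mpr hz, hz]
  · have hgz : g f[i] ≠ 0 := fun hc => hz (hiff.mp hc)
    rw [show (g f[i] != 0) = true from by simpa using hgz,
      show (f[i] != 0) = true from by simpa using hz]

lemma map_dec_all_zero {f : List Int} (h : nzFrom f 0 = []) (w : Int) :
    f.map (fun x => if x = 0 then 0 else x - w) = f := by
  have hx : ∀ x ∈ f, (if x = 0 then 0 else x - w) = x := by
    intro x hx
    simp [all_zero_of_nzFrom_nil h x hx]
  rw [List.map_congr_left hx, List.map_id']

lemma roundSolve_batch : ∀ (q : Nat) (f : List Int) (m : Nat),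
    (∀ x ∈ f, 0 < x → (q : Int) + 1 ≤ x) → (q + 1) * (nzFrom f 0).length ≤ m →
    roundSolve f m = roundSolve (f.map (fun x => if x = 0 then 0 else x - ((q : Int) + 1)))
      (m - (q + 1) * (nzFrom f 0).length) := by
  intro q
  induction q with
  | zero =>
    intro f m hpos hm
    simp only [Nat.cast_zero, zero_add, Nat.zero_add, one_mul] at hm ⊢
    by_cases hc : (nzFrom f 0).length = 0
    · rw [List.length_eq_zero_iff] at hc
      rw [map_dec_all_zero hc]
      simp [hc]
    · have hdec : f.map (fun x => if x = 0 then 0 else x - (1 : Int)) = decs f := rfl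
      rw [hdec]
      conv_lhs => rw [roundSolve]
      rw [dif_neg (by omega), dif_neg hc]
  | succ q ihq =>
    intro f m hpos hm
    by_cases hc : (nzFrom f 0).length = 0
    · rw [List.length_eq_zero_iff] at hc
      rw [map_dec_all_zero hc]
      simp [hc]
    · have hdist : (q + 1 + 1) * (nzFrom f 0).length
          = (q + 1) * (nzFrom f 0).length + (nzFrom f 0).length := by ring
      rw [hdist] at hm
      have hm' : (q + 1) * (nzFrom f 0).length ≤ m := by omega
      rw [ihq f m (fun x hx hp => by have := hpos x hx hp; push_cast; push_cast at this; omega) hm']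
      set f1 := f.map (fun x => if x = 0 then 0 else x - ((q : Int) + 1)) with hf1
      have hnz1 : nzFrom f1 0 = nzFrom f 0 := by
        rw [hf1]
        apply nzFrom_map_eq
        intro x hx
        by_cases hz : x = 0
        · simp [hz]
        · rw [if_neg hz]
          constructor
          · intro hc0
            by_cases hp : 0 < x
            · have := hpos x hx hp
              push_cast at this
              omega
            · omega
          · intro hc0
            exact absurd hc0 hz
      conv_lhs => rw [roundSolve]
      rw [hnz1]
      rw [dif_neg (by omega), dif_neg hc]
      have hdec2 : decs f1 = f.map (fun x => if x = 0 then 0 else x - (((q : Nat) + 1 : Nat) : Int)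
          - 1) := by
        rw [hf1]
        unfold decs
        rw [List.map_map]
        apply List.map_congr_left
        intro x hx
        simp only [Function.comp_apply]
        by_cases hz : x = 0
        · simp [hz, dec1]
        · rw [if_neg hz, if_neg hz]
          have hne : x - ((q : Int) + 1) ≠ 0 := by
            by_cases hp : 0 < x
            · have := hpos x hx hp
              push_cast at this
              omega
            · omega
          unfold dec1
          rw [if_neg hne]
          push_cast
          ring
      rw [hdec2]
      congr 1
      · apply List.map_congr_left
        intro x _
        by_cases hz : x = 0
        · simp [hz]
        · rw [if_neg hz, if_neg hz]
          push_cast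
          ring
      · rw [hdist]
        omega

lemma map_getD_range' (f : List Int) : (List.range' 0 f.length).map (fun i => f.getD i 0) = f := by
  apply List.ext_getElem (by simp)
  intro i h1 h2
  rw [List.getElem_map, List.getElem_range']
  rw [show 0 + 1 * i = i by omega, getD_lt h2]

lemma nzFrom_length_eq_countP (f : List Int) :
    (nzFrom f 0).length = f.countP (fun x => x != 0) := by
  unfold nzFrom
  rw [← List.countP_eq_length_filter, Nat.sub_zero]
  conv_rhs => rw [← map_getD_range' f]
  rw [List.countP_map]
  rfl

lemma posSum_decBy {f : List Int} {q : Int} (hq : 0 ≤ q) (h : ∀ x ∈ f, 0 < x → q ≤ x) :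
    posSum (f.map (fun x => if x = 0 then 0 else x - q)) = posSum f - q * (f.countP (fun x => decide (0 < x)) : Int) := by
  unfold posSum
  rw [List.map_map]
  have hpt : ∀ x ∈ f, (max ((if x = 0 then 0 else x - q)) 0)
      = max x 0 + (-q) * (if (fun y => decide (0 < y)) x = true then (1 : Int) else 0) := by
    intro x hx
    by_cases hz : x = 0
    · simp [hz]
    · by_cases hp : 0 < x
      · have := h x hx hp
        simp only [if_neg hz, hp, decide_true, if_pos]
        omega
      · simp only [if_neg hz, hp, decide_false]
        norm_num
        omega
  rw [List.map_congr_left (by intro x hx; exact hpt x hx)]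
  rw [PySem.List.sum_map_add_int f (fun x => max x 0)
    (fun x => (-q) * (if (fun y => decide (0 < y)) x = true then (1 : Int) else 0))]
  rw [List.sum_map_mul_left, PySem.List.sum_map_ite_one_zero]
  ring

lemma enough_batch {f : List Int} {m : Nat} {q : Nat} (he : enough f m) (hq : 1 ≤ q)
    (hpos : ∀ x ∈ f, 0 < x → (q : Int) ≤ x) (hqc : q * (nzFrom f 0).length ≤ m) :
    enough (f.map (fun x => if x = 0 then 0 else x - (q : Int))) (m - q * (nzFrom f 0).length) := by
  rcases he with ⟨x, hx, hneg⟩ | hpos'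
  · left
    refine ⟨x - q, List.mem_map.mpr ⟨x, hx, by rw [if_neg (by omega)]⟩, by
      have : (0 : Int) ≤ (q : Int) := Int.natCast_nonneg q
      omega⟩
  · right
    rw [posSum_decBy (Int.natCast_nonneg q) hpos]
    have hcp : f.countP (fun x => decide (0 < x)) ≤ (nzFrom f 0).length := by
      rw [nzFrom_length_eq_countP]
      exact List.countP_mono_left (by intro a _ hpa; simp at hpa ⊢; omega)
    have hmul : q * f.countP (fun x => decide (0 < x)) ≤ q * (nzFrom f 0).length :=
      Nat.mul_le_mul_left q hcp
    have hcast : ((m - q * (nzFrom f 0).length : Nat) : Int)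
        = (m : Int) - ((q * (nzFrom f 0).length : Nat) : Int) := by
      omega
    rw [hcast]
    push_cast at hmul ⊢
    omega

lemma countP_lt_of_witness {α : Type} {p q : α → Bool} : ∀ (l : List α) (a : α),
    (∀ x ∈ l, p x = true → q x = true) → a ∈ l → p a = false → q a = true →
    l.countP p < l.countP q := by
  intro l
  induction l with
  | nil => intro a _ ha; simp at ha
  | cons b l ihl =>
    intro a hmono hmem hpa hqa
    rw [List.countP_cons, List.countP_cons]
    have htail := List.countP_mono_left (fun x hx => hmono x (List.mem_cons_of_mem b hx))
    rcases List.mem_cons.mp hmem with rfl | hmem'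
    · rw [hpa, hqa]
      simp
      omega
    · have hlt := ihl a (fun x hx => hmono x (List.mem_cons_of_mem b hx)) hmem' hpa hqa
      by_cases hb : p b = true
      · rw [hb, hmono b List.mem_cons_self hb]
        simp
        omega
      · rw [Bool.not_eq_true] at hb
        rw [hb]
        simp
        split <;> omega

lemma countP_pos_strict {f : List Int} {mp : Int} (hmem : mp ∈ f) (h0 : 0 < mp) :
    (f.map (fun x => if x = 0 then 0 else x - mp)).countP (fun x => decide (0 < x)) < f.countP (fun x => decide (0 < x)) := by
  rw [List.countP_map]
  apply countP_lt_of_witness f mp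
  · intro x _ hx
    simp only [Function.comp_apply] at hx ⊢
    by_cases hz : x = 0 <;> simp [hz] at hx ⊢ <;> omega
  · exact hmem
  · simp only [Function.comp_apply]
    by_cases hz : mp = 0 <;> simp [hz] <;> omega
  · simp [h0]

lemma loopB_ret {f : List Int} {k : Int} (fuel : Nat) (hk : 0 ≤ k)
    (hc : k < ((nzFrom f 0).length : Int)) :
    loopB (fuel + 1) f k = (roundSolve f k.toNat).map (· + 1) := by
  have hlt : k.toNat < (nzFrom f 0).length := by omega
  simp only [loopB]
  rw [nz_int_eq f, List.length_map,
    if_pos (by exact_mod_cast hc),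
    show k = ((k.toNat : Nat) : Int) from (Int.toNat_of_nonneg hk).symm,
    PySem.List.pyGet?_natCast, Int.toNat_natCast,
    List.getElem?_eq_getElem (by rw [List.length_map]; exact hlt), List.getElem_map]
  conv_rhs => rw [roundSolve]
  rw [dif_pos hlt]
  simp

lemma roundSolve_batch' {f : List Int} {q : Int} {m : Nat} (hq : 1 ≤ q)
    (hpos : ∀ x ∈ f, 0 < x → q ≤ x) (hqm : q.toNat * (nzFrom f 0).length ≤ m) :
    roundSolve f m
      = roundSolve (f.map (fun x => if x = 0 then 0 else x - q)) (m - q.toNat * (nzFrom f 0).length) := by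
  have h1 : ((q.toNat - 1 : Nat) : Int) + 1 = q := by omega
  have h2 : q.toNat - 1 + 1 = q.toNat := by omega
  have := roundSolve_batch (q.toNat - 1) f m (by rw [h1]; exact hpos) (by rw [h2]; exact hqm)
  rw [h1, h2] at this
  exact this

lemma enough_batch' {f : List Int} {m : Nat} {q : Int} (he : enough f m) (hq : 1 ≤ q)
    (hpos : ∀ x ∈ f, 0 < x → q ≤ x) (hqc : q.toNat * (nzFrom f 0).length ≤ m) :
    enough (f.map (fun x => if x = 0 then 0 else x - q)) (m - q.toNat * (nzFrom f 0).length) := by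
  have h1 : ((q.toNat : Nat) : Int) = q := by omega
  have := enough_batch he (by omega : 1 ≤ q.toNat) (by rw [h1]; exact hpos) hqc
  rw [h1] at this
  exact this

lemma loopB_correct (fuel : Nat) : ∀ (f : List Int) (k : Int), 0 ≤ k → enough f k.toNat →
    f.countP (fun x => decide (0 < x)) + 2 ≤ fuel →
    loopB fuel f k = (roundSolve f k.toNat).map (· + 1) := by
  induction fuel with
  | zero => intro f k _ _ hfuel; omega
  | succ fuel ih =>
    intro f k hk he hfuel
    have hhit := exists_nz_of_enough he
    have hcpos : 0 < (nzFrom f 0).length := List.length_pos_of_ne_nil (nzFrom_ne_nil hhit)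
    by_cases hklt : k < ((nzFrom f 0).length : Int)
    · exact loopB_ret fuel hk hklt
    · simp only [loopB]
      rw [nz_int_eq f, List.length_map, if_neg hklt,
        if_neg (by exact_mod_cast Nat.pos_iff_ne_zero.mp hcpos),
        PySem.Int.floordiv_eq_ediv_of_pos (by exact_mod_cast hcpos)]
      have hq01 : 1 ≤ k / ((nzFrom f 0).length : Int) := by
        rw [Int.le_ediv_iff_mul_le (by exact_mod_cast hcpos)]
        omega
      have hq0c : k / ((nzFrom f 0).length : Int) * ((nzFrom f 0).length : Int) ≤ k :=
        Int.ediv_mul_le k (by exact_mod_cast Nat.pos_iff_ne_zero.mp hcpos)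
      have hmodlt : k - k / ((nzFrom f 0).length : Int) * ((nzFrom f 0).length : Int)
          < ((nzFrom f 0).length : Int) := by
        have h1 : k % ((nzFrom f 0).length : Int) < ((nzFrom f 0).length : Int) :=
          Int.emod_lt_of_pos k (by exact_mod_cast hcpos)
        have h2 : k % ((nzFrom f 0).length : Int)
            = k - k / ((nzFrom f 0).length : Int) * ((nzFrom f 0).length : Int) := by
          rw [Int.emod_def]
          ring
        omega
      have hcast0 : (((k / ((nzFrom f 0).length : Int)).toNat * (nzFrom f 0).length : Nat) : Int)
          = k / ((nzFrom f 0).length : Int) * ((nzFrom f 0).length : Int) := by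
        push_cast [Int.toNat_of_nonneg (by omega : (0 : Int) ≤ k / ((nzFrom f 0).length : Int))]
        ring
      cases hmin : PySem.List.min? (f.filter fun x => decide (0 < x)) id with
      | none =>
        simp only [hmin]
        have hposE : ∀ x ∈ f, ¬ (0 < x) := by
          have hnil := (PySem.List.min?_eq_none_iff _ id).mp hmin
          intro x hx hp
          have : x ∈ List.filter (fun x => decide (0 < x)) f := List.mem_filter.mpr ⟨hx, by simp [hp]⟩
          rw [hnil] at this
          simp at this
        have hnz' : nzFrom (f.map (fun x => if x = 0 then 0
            else x - k / ((nzFrom f 0).length : Int))) 0 = nzFrom f 0 := by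
          apply nzFrom_map_eq
          intro x hx
          by_cases hz : x = 0
          · simp [hz]
          · rw [if_neg hz]
            have := hposE x hx
            omega
        obtain ⟨fl, rfl⟩ : ∃ fl, fuel = fl + 1 := ⟨fuel - 1, by omega⟩
        rw [loopB_ret fl (by omega) (by rw [hnz']; exact_mod_cast hmodlt)]
        rw [roundSolve_batch' (f := f) hq01 (fun x hx hp => absurd hp (hposE x hx))
          (by rw [← hcast0] at hq0c; omega)]
        congr 2
        rw [← hcast0] at hq0c ⊢
        omega
      | some mp =>
        simp only [hmin]
        have hmpf : mp ∈ f ∧ 0 < mp := by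
          have := List.mem_filter.mp (PySem.List.min?_mem hmin)
          exact ⟨this.1, by simpa using this.2⟩
        have hmple : ∀ x ∈ f, 0 < x → mp ≤ x := by
          intro x hx hp
          have := PySem.List.min?_isMin hmin x (List.mem_filter.mpr ⟨hx, by simp [hp]⟩)
          simpa using this
        by_cases hcase : mp ≤ k / ((nzFrom f 0).length : Int)
        · -- the smallest positive food gets exhausted by this jump: recurse
          rw [show (if mp < k / ((nzFrom f 0).length : Int) then mp
            else k / ((nzFrom f 0).length : Int)) = mp from by split <;> omega]
          have hmpc : mp * ((nzFrom f 0).length : Int) ≤ k := by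
            have := mul_le_mul_of_nonneg_right hcase
              (by positivity : (0 : Int) ≤ ((nzFrom f 0).length : Int))
            omega
          have hcastm : ((mp.toNat * (nzFrom f 0).length : Nat) : Int)
              = mp * ((nzFrom f 0).length : Int) := by
            push_cast [Int.toNat_of_nonneg (by omega : (0 : Int) ≤ mp)]
            ring
          have hcnt := countP_pos_strict hmpf.1 hmpf.2
          rw [ih (f.map (fun x => if x = 0 then 0 else x - mp))
            (k - mp * ((nzFrom f 0).length : Int)) (by omega)
            (by
              have h9 := enough_batch' he (by omega : 1 ≤ mp) hmple
                (by rw [← hcastm] at hmpc; omega)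
              rw [show (k - mp * ((nzFrom f 0).length : Int)).toNat
                = k.toNat - mp.toNat * (nzFrom f 0).length from by
                  rw [← hcastm] at hmpc ⊢; omega]
              exact h9)
            (by omega)]
          rw [roundSolve_batch' (by omega : 1 ≤ mp) hmple
            (by rw [← hcastm] at hmpc; omega)]
          congr 2
          rw [← hcastm] at hmpc ⊢
          omega
        · -- only a partial round remains after the jump
          rw [show (if mp < k / ((nzFrom f 0).length : Int) then mp
            else k / ((nzFrom f 0).length : Int)) = k / ((nzFrom f 0).length : Int)
            from by split <;> omega]
          have hnz' : nzFrom (f.map (fun x => if x = 0 then 0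
              else x - k / ((nzFrom f 0).length : Int))) 0 = nzFrom f 0 := by
            apply nzFrom_map_eq
            intro x hx
            by_cases hz : x = 0
            · simp [hz]
            · rw [if_neg hz]
              by_cases hp : 0 < x
              · have := hmple x hx hp
                omega
              · omega
          obtain ⟨fl, rfl⟩ : ∃ fl, fuel = fl + 1 := ⟨fuel - 1, by omega⟩
          rw [loopB_ret fl (by omega) (by rw [hnz']; exact_mod_cast hmodlt)]
          rw [roundSolve_batch' (f := f) hq01 (fun x hx hp => by have := hmple x hx hp; omega)
            (by rw [← hcast0] at hq0c; omega)]
          congr 2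
          rw [← hcast0] at hq0c ⊢
          omega

-- ===== VERDICT (by name: the statement is the Claim_ definition above) =====
theorem solution_spec : Claim_equal_solution := by
  intro f k _ hpre
  obtain ⟨hne, hcases⟩ := hpre
  have hn : 0 < f.length := List.length_pos_of_ne_nil hne
  unfold Spec_solution solution solution_alt
  rcases hcases with ⟨hk, hex⟩ | ⟨hk, hen⟩
  · -- k < 1 : one unit is eaten, then timer > k and A answers -1; B answers -1 directly
    rw [if_pos hk]
    have hhit : ∃ i, i < f.length ∧ f.getD i 0 ≠ 0 := by
      obtain ⟨x, hx, hxz⟩ := hex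
      obtain ⟨i, hi, rfl⟩ := List.mem_iff_getElem.mp hx
      exact ⟨i, hi, by rw [getD_lt hi]; exact hxz⟩
    have hcd := cycd_lt hn hhit
    have hF : (k.toNat + 1) * (f.length + 1) + 1 = f.length + 2 := by
      rw [show k.toNat = 0 from by omega]
      ring
    have hA := loopA_neg ((k.toNat + 1) * (f.length + 1) + 1) f 0 k hn hk hhit (by omega)
    simp only [Nat.cast_zero] at hA
    rw [hA]
    rfl
  · -- 1 ≤ k : both programs deliver the round-robin unit number k
    rw [if_neg (by omega)]
    have hen' : enough f k.toNat := by
      rcases hen with hneg | hlt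
      · exact Or.inl hneg
      · right
        rw [Int.toNat_of_nonneg (by omega)]
        exact hlt
    have hhit := exists_nz_of_enough hen'
    have hcd := cycd_lt hn hhit
    have hF : (k.toNat + 1) * (f.length + 1)
        = k.toNat * f.length + k.toNat + f.length + 1 := by ring
    have hA := loopA_eq ((k.toNat + 1) * (f.length + 1) + 1) f 0 0 k k.toNat hn (by omega)
      (by omega) hen' (by omega)
    simp only [Nat.cast_zero] at hA
    rw [hA, specFrom_zero]
    rw [loopB_correct (f.length + 2) f k (by omega) hen'
      (by have := List.countP_le_length (p := fun x => decide (0 < x)) (l := f); omega)]
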